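-- pv_equiv track=rewrite | github.com/loicsauteur/metroloshiny | src/metroloshiny/utils/common_utils.py | check_duplicate_dict_values
-- ===== SOURCE A (Python) =====
-- from collections import defaultdict
-- from typing import Optional
--
-- def check_duplicate_dict_values(
--     d: dict[str, str], exclude: Optional[str] = "None"
-- ) -> Optional[dict]:
--     """
--     Check if a dictionary contains duplicate values.
--
--     Used for checking if a channel identifier (C1 = values)
--     was selected for multiple channel names (DAPI/GFP = keys)
--
--     :param d: dict with single str for keys and values.
--     :param exclude: Optional str, to exclude a specific value item.
--
--     :return: None if no duplicate,
--         otherwise a dict of the first duplicate value.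
--     """
--     # Group keys by value
--     groups = defaultdict(list)
--     for k, v in d.items():
--         if v != exclude:
--             groups[v].append(k)
--     # Return key & value for first item that has mulitple values
--     for k, v in groups.items():
--         if len(v) > 1:
--             return {k: v}
--     return None
-- ===== SOURCE B (Python) =====
-- from typing import Optional
--
-- def check_duplicate_dict_values(
--     d: dict[str, str], exclude: Optional[str] = "None"
-- ) -> Optional[dict]:
--     # Count occurrences of each non-excluded value.
--     counts = {}
--     for v in d.values():
--         if v != exclude:
--             counts[v] = counts.get(v, 0) + 1
--     # First value (in dict order) occurring more than once.
--     dup = None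
--     for v in d.values():
--         if v != exclude and counts[v] > 1:
--             dup = v
--             break
--     if dup is None:
--         return None
--     return {dup: [k for k, v in d.items() if v == dup]}
-- ===== Notes on version B (the rewrite author's own statement) =====
-- stated objective: alternative
-- what changed: A groups keys by value into a defaultdict and scans the groups for one with more than one key; B instead counts value frequencies, scans the dict values for the first one with count > 1, and rebuilds that value's key list with a single comprehension.
import Mathlib
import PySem

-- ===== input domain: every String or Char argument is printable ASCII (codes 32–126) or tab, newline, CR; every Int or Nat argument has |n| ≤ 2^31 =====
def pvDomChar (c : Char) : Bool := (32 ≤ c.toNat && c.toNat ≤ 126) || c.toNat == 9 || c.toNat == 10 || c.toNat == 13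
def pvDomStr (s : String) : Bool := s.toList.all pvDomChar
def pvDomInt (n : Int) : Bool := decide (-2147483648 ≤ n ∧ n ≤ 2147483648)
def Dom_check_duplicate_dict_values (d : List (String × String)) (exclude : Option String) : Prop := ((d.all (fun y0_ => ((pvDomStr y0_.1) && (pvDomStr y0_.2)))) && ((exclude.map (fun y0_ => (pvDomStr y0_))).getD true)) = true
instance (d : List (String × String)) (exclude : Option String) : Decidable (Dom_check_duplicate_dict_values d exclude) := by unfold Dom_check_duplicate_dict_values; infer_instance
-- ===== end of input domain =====

-- B replaces A's group-keys-by-value pass with a value-frequency count plus a scan of the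
-- dict values for the first duplicated one (objective: alternative decomposition, same cost).

-- ===== PORT A =====
-- 'for k, v in groups.items(): if len(v) > 1: return {k: v}' / 'return None'
def pvFirstDup : List (String × List String) → Option (List (String × List String))
  | [] => none
  | (k, v) :: rest => if 1 < v.length then some [(k, v)] else pvFirstDup rest

def check_duplicate_dict_values (d : List (String × String)) (exclude : Option String) : Option (List (String × List String)) :=
  -- groups = defaultdict(list); for k, v in d.items(): if v != exclude: groups[v].append(k)
  let groups : PySem.Dict String (List String) :=
    d.foldl (fun g p => if some p.2 ≠ exclude then g.modify p.2 [] (· ++ [p.1]) else g) PySem.Dict.empty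
  pvFirstDup groups.items

-- ===== PORT B =====
-- Source B's second loop: first value v (in dict order) with v != exclude and counts[v] > 1
def pvFindDup (exclude : Option String) (counts : PySem.Dict String Int) : List String → Option String
  | [] => none
  | v :: rest => if some v ≠ exclude ∧ 1 < counts.getD v 0 then some v else pvFindDup exclude counts rest

def check_duplicate_dict_values_alt (d : List (String × String)) (exclude : Option String) : Option (List (String × List String)) :=
  -- counts = {}; for v in d.values(): if v != exclude: counts[v] = counts.get(v, 0) + 1
  let counts : PySem.Dict String Int :=
    d.foldl (fun c p => if some p.2 ≠ exclude then c.insert p.2 (c.getD p.2 0 + 1) else c) PySem.Dict.empty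
  match pvFindDup exclude counts (d.map (·.2)) with
  | none => none
  | some v => some [(v, (d.filter (fun p => p.2 == v)).map (·.1))]

-- ===== PRECONDITION & SPEC =====
-- A Python dict cannot have duplicate keys, so association lists with repeated keys model
-- no input of A and are excluded (A's value on them is not defined by the Python source).
def Pre_check_duplicate_dict_values (d : List (String × String)) (exclude : Option String) : Prop :=
  (d.map (·.1)).Nodup
instance (d : List (String × String)) (exclude : Option String) : Decidable (Pre_check_duplicate_dict_values d exclude) := by unfold Pre_check_duplicate_dict_values; infer_instance

def pvWitness_check_duplicate_dict_values : (List (String × String)) × Option String :=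
  ([("DAPI", "C1"), ("GFP", "C1"), ("Cy5", "C2")], some "None")

def Spec_check_duplicate_dict_values (d : List (String × String)) (exclude : Option String) (out : Option (List (String × List String))) : Prop := out = check_duplicate_dict_values_alt d exclude
instance (d : List (String × String)) (exclude : Option String) (out : Option (List (String × List String))) : Decidable (Spec_check_duplicate_dict_values d exclude out) := by unfold Spec_check_duplicate_dict_values; infer_instance

-- ===== CLAIM (what is proved, stated in full; the proofs are below) =====
def Claim_equal_check_duplicate_dict_values : Prop := ∀ (d : List (String × String)) (exclude : Option String), Dom_check_duplicate_dict_values d exclude → Pre_check_duplicate_dict_values d exclude → Spec_check_duplicate_dict_values d exclude (check_duplicate_dict_values d exclude)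

-- ===== LEMMAS AND PROOFS =====

-- find? sees Set.ofList xs exactly as it sees xs (first-occurrence order)
lemma pv_find?_foldl_add (p : String → Bool) (xs acc : List String) :
    ((xs.foldl PySem.Set.add acc).find? p) = (acc.find? p).or (xs.find? p) := by
  induction xs generalizing acc with
  | nil => simp
  | cons x t ih =>
      simp only [List.foldl_cons, ih]
      by_cases hx : PySem.Set.contains acc x
      · have hmem : x ∈ acc := by simpa [PySem.Set.contains] using hx
        have hadd : PySem.Set.add acc x = acc := by simp [PySem.Set.add, hmem]
        rw [hadd]
        cases hacc : acc.find? p with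
        | some v => simp
        | none =>
            have hnx : p x = false :=
              Bool.eq_false_iff.mpr (fun h => List.find?_eq_none.mp hacc x hmem h)
            simp [hnx]
      · have hmem : x ∉ acc := by simpa [PySem.Set.contains] using hx
        have hadd : PySem.Set.add acc x = acc ++ [x] := by simp [PySem.Set.add, hmem]
        rw [hadd, List.find?_append]
        cases hpx : p x <;> simp [hpx]

lemma pv_find?_ofList (p : String → Bool) (xs : List String) :
    (PySem.Set.ofList xs).find? p = xs.find? p := by
  rw [PySem.Set.ofList_eq_foldl, pv_find?_foldl_add]; simp

-- A's result scan as a find?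
lemma pv_firstDup_eq_find? (xs : List (String × List String)) :
    pvFirstDup xs = (xs.find? (fun q => decide (1 < q.2.length))).map (fun q => [q]) := by
  induction xs with
  | nil => rfl
  | cons q t ih =>
      obtain ⟨k, v⟩ := q
      by_cases h : 1 < v.length <;> simp [pvFirstDup, h, ih]

-- B's result scan as a find?
lemma pv_findDup_eq_find? (exclude : Option String) (c : PySem.Dict String Int) (ws : List String) :
    pvFindDup exclude c ws = ws.find? (fun v => decide (some v ≠ exclude ∧ 1 < c.getD v 0)) := by
  induction ws with
  | nil => rfl
  | cons v t ih =>
      by_cases h : some v ≠ exclude ∧ 1 < c.getD v 0 <;> simp [pvFindDup, h, ih]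

-- a find? whose test has a guard conjunct is a find? over the guarded filter
lemma pv_find?_and_filter (q p : String → Bool) (l : List String) :
    l.find? (fun x => q x && p x) = (l.filter q).find? p := by
  induction l with
  | nil => rfl
  | cons x t ih =>
      simp only [List.find?_cons, List.filter_cons]
      cases hq : q x with
      | false => simpa using ih
      | true =>
          cases hp : p x with
          | true => simp [hp]
          | false => simpa [hp] using ih

-- characterization of A's port
lemma pv_A_char (d : List (String × String)) (exclude : Option String) :
    check_duplicate_dict_values d exclude =
      (((d.filter (fun p => decide (some p.2 ≠ exclude))).map (·.2)).find?
          (fun v => decide (1 < (d.filter (fun p => decide (some p.2 ≠ exclude))).countP (fun p => p.2 == v)))).map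
        (fun v => [(v, ((d.filter (fun p => decide (some p.2 ≠ exclude))).filter (fun p => p.2 == v)).map (·.1))]) := by
  set L := d.filter (fun p => decide (some p.2 ≠ exclude)) with hLdef
  set G := L.foldl (fun g p => g.modify p.2 [] (· ++ [p.1])) PySem.Dict.empty with hGdef
  have hfold : check_duplicate_dict_values d exclude = pvFirstDup G.items := by
    simp only [check_duplicate_dict_values]
    rw [PySem.List.foldl_ite_eq_foldl_filter]
  have hswap : G = (L.map Prod.swap).foldl (fun g q => g.modify q.1 [] (· ++ [q.2])) PySem.Dict.empty := by
    rw [List.foldl_map]; rfl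
  have hnd : G.keys.Nodup :=
    PySem.Dict.nodup_keys_foldl_modify_key _ _ _ _ _ PySem.Dict.nodup_keys_empty
  have hkeys : G.keys = PySem.Set.ofList (L.map (·.2)) := by
    rw [hGdef, PySem.Dict.keys_foldl_modify_key]
    simp [PySem.Set.update, PySem.Set.ofList_eq_foldl]
  have hgetD : ∀ v, G.getD v [] = (L.filter (fun p => p.2 == v)).map (·.1) := by
    intro v
    rw [hswap, PySem.Dict.getD_foldl_modify_append]
    simp [List.filter_map, Function.comp_def, List.map_map]
  have hitems : G.items = (PySem.Set.ofList (L.map (·.2))).map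
      (fun v => (v, (L.filter (fun p => p.2 == v)).map (·.1))) := by
    rw [PySem.Dict.items_eq_map_keys G hnd [], hkeys]
    exact List.map_congr_left (fun v _ => by rw [hgetD v])
  rw [hfold, hitems, pv_firstDup_eq_find?, List.find?_map, Option.map_map,
    pv_find?_ofList]
  have hpred : ((fun q => decide (1 < q.2.length)) ∘
      fun v => (v, (L.filter (fun p => p.2 == v)).map (·.1)))
      = fun v => decide (1 < L.countP (fun p => p.2 == v)) := by
    funext v
    simp [Function.comp, List.countP_eq_length_filter]
  rw [hpred]
  rfl

-- characterization of B's port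
lemma pv_B_char (d : List (String × String)) (exclude : Option String) :
    check_duplicate_dict_values_alt d exclude =
      (((d.filter (fun p => decide (some p.2 ≠ exclude))).map (·.2)).find?
          (fun v => decide (1 < (d.filter (fun p => decide (some p.2 ≠ exclude))).countP (fun p => p.2 == v)))).map
        (fun v => [(v, (d.filter (fun p => p.2 == v)).map (·.1))]) := by
  set L := d.filter (fun p => decide (some p.2 ≠ exclude)) with hLdef
  set C : PySem.Dict String Int := L.foldl (fun c p => c.insert p.2 (c.getD p.2 0 + 1)) PySem.Dict.empty with hCdef
  have hfold : check_duplicate_dict_values_alt d exclude =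
      (match pvFindDup exclude C (d.map (·.2)) with
       | none => none
       | some v => some [(v, (d.filter (fun p => p.2 == v)).map (·.1))]) := by
    simp only [check_duplicate_dict_values_alt]
    rw [PySem.List.foldl_ite_eq_foldl_filter]
  have hcount : ∀ v, C.getD v 0 = ((L.map (·.2)).count v : Int) := by
    intro v
    have hgf : C = (L.map (·.2)).foldl
        (fun (c : PySem.Dict String Int) x => c.insert x (c.getD x 0 + 1)) PySem.Dict.empty := by
      rw [List.foldl_map]
    rw [hgf, PySem.Dict.getD_foldl_insert_add_one]
    simp
  rw [hfold, pv_findDup_eq_find?]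
  have hpred : (fun v => decide (some v ≠ exclude ∧ 1 < C.getD v 0))
      = fun v => decide (some v ≠ exclude) && decide (1 < L.countP (fun p => p.2 == v)) := by
    funext v
    rw [hcount v]
    simp [List.count, List.countP_map]
    rfl
  rw [hpred, pv_find?_and_filter, List.filter_map]
  have hfil : (d.filter ((fun v => decide (some v ≠ exclude)) ∘ (·.2))) = L := by
    simp [Function.comp_def, hLdef]
  rw [hfil]
  cases h : (L.map (·.2)).find? (fun v => decide (1 < L.countP (fun p => p.2 == v))) <;> simp

theorem check_duplicate_dict_values_spec : Claim_equal_check_duplicate_dict_values := by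
  intro d exclude _ _
  unfold Spec_check_duplicate_dict_values
  rw [pv_A_char, pv_B_char]
  set L := d.filter (fun p => decide (some p.2 ≠ exclude)) with hLdef
  cases h : (L.map (·.2)).find? (fun v => decide (1 < L.countP (fun p => p.2 == v))) with
  | none => simp
  | some v =>
      have hv : v ∈ L.map (·.2) := List.mem_of_find?_eq_some h
      obtain ⟨p0, hp0L, hp0v⟩ := List.mem_map.mp hv
      have hp0 : decide (some p0.2 ≠ exclude) = true := (List.mem_filter.mp hp0L).2
      have hvex : some v ≠ exclude := by rw [← hp0v]; exact of_decide_eq_true hp0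
      have hfil : L.filter (fun p => p.2 == v) = d.filter (fun p => p.2 == v) := by
        rw [hLdef, List.filter_filter]
        apply List.filter_congr
        intro p _
        cases hpv : (p.2 == v) with
        | false => simp
        | true =>
            have : p.2 = v := by simpa using hpv
            simp [this, hvex]
      simp [hfil]
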